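-- pv_equiv track=rewrite | github.com/goc-dev/psalmer-bot | personal-branches/ivan-babariko/cho_converter.py | check_f1
-- ===== SOURCE A (Python) =====
-- def check_f1(s: str)->(bool, list):
--     string_valid = True
--     report = []
--     brackets_mistake = False
--     sep_mistake = False
--     if "|]" in s:
--         string_valid = False
--         report.append("Invalid sintaxis: you must use [chord|-] instead of [chord|]")
--     brackets_level = 0
--     sep_in = 0
--     in_brackets = False
--     for c in s:
--         if c == "[":
--             brackets_level += 1
--             in_brackets = True
--         elif c == "]":
--             brackets_level -= 1
--             in_brackets = False
--             sep_in = 0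
--         elif c == "|" and in_brackets:
--             sep_in += 1
--         if not (0 == brackets_level or 1 == brackets_level):
--             string_valid = False
--             brackets_mistake = True
--         if sep_in > 1:
--             sep_mistake = True
--             string_valid = False
--     if brackets_mistake:
--         report.append("The string contains unpaired or nested brackets")
--     if sep_mistake:
--         report.append("'The string contains more than 1 chords separators "|" in brackets'")
--     return (string_valid, report)
-- ===== SOURCE B (Python) =====
-- def check_f1(s: str) -> (bool, list):
--     report = []
--     if "|]" in s:
--         report.append("Invalid sintaxis: you must use [chord|-] instead of [chord|]")
--     # pass 1: bracket depth only
--     depth = 0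
--     bad_depth = False
--     for c in s:
--         if c == "[":
--             depth += 1
--         elif c == "]":
--             depth -= 1
--         bad_depth = bad_depth or depth not in (0, 1)
--     if bad_depth:
--         report.append("The string contains unpaired or nested brackets")
--     # pass 2: per ']'-delimited segment, separators after the first '['
--     if any(seg.partition("[")[2].count("|") > 1 for seg in s.split("]")):
--         report.append('The string contains more than 1 chords separators "|" in brackets')
--     return (len(report) == 0, report)
-- ===== Notes on version B (the rewrite author's own statement) =====
-- stated objective: simpler
-- what changed: Replaces the single interleaved six-variable loop by two independent checks: a pass tracking only the running bracket depth, and a split-into-segments test for multiple chord separators after an opening bracket, with validity read off as the report being empty.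
-- crash fix: A raises TypeError (its last append applies the bitwise-or operator to two strings, because the message literal is broken at an unquoted pipe character) on every input in which some segment between closing brackets contains two separators after an opening bracket; B returns the string marked invalid there with the evidently intended separator message. — e.g. on check_f1("[a|b|c]"): A raises TypeError, B returns (false, ["The string contains more than 1 chords separators \"|\" in brackets"])
import Mathlib
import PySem

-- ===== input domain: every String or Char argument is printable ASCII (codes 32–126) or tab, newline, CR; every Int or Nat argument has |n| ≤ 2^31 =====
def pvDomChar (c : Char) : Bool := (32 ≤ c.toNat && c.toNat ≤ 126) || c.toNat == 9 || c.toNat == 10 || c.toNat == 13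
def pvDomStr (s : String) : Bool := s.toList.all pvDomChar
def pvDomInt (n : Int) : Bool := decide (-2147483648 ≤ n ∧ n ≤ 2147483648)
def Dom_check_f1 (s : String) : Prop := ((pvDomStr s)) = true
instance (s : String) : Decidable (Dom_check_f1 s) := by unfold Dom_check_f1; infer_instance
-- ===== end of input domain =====

-- B replaces A's single interleaved 6-variable loop by two independent checks (a bracket-depth pass
-- and a segment test on the pieces between closing brackets), reading validity off as the report
-- being empty — objective: simpler. A's last append applies the bitwise-or operator to two strings
-- (a TypeError: its message literal is broken at an unquoted pipe character): A RAISES wherever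
-- sep_mistake fires; those inputs are outside Pre_ (see the Raises_ block).

-- ===== PORT A =====
def pvMsg1 : String := "Invalid sintaxis: you must use [chord|-] instead of [chord|]"
def pvMsg2 : String := "The string contains unpaired or nested brackets"

-- the for-loop of A, state (string_valid, brackets_mistake, sep_mistake, brackets_level, sep_in, in_brackets)
def aLoop : List Char → (Bool × Bool × Bool × Int × Int × Bool) → (Bool × Bool × Bool × Int × Int × Bool)
  | [], st => st
  | c :: cs, (v, bm, sm, lvl, sep, inb) =>
    let lvl' := if c = '[' then lvl + 1 else if c = ']' then lvl - 1 else lvl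
    let sep' := if c = '[' then sep else if c = ']' then 0 else if c = '|' ∧ inb = true then sep + 1 else sep
    let inb' := if c = '[' then true else if c = ']' then false else inb
    let v := if ¬ (lvl' = 0 ∨ lvl' = 1) then false else v
    let bm := if ¬ (lvl' = 0 ∨ lvl' = 1) then true else bm
    let v := if sep' > 1 then false else v
    let sm := if sep' > 1 then true else sm
    aLoop cs (v, bm, sm, lvl', sep', inb')

def check_f1 (s : String) : Bool × List String :=
  let valid0 := !PySem.Str.isIn "|]" s
  let report0 : List String := if PySem.Str.isIn "|]" s then [pvMsg1] else []
  let r := aLoop s.toList (valid0, false, false, 0, 0, false)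
  let report1 := if r.2.1 then report0 ++ [pvMsg2] else report0
  -- if r.2.2.1 (sep_mistake) the Python raises TypeError ("str" | "str") at its final append;
  -- those inputs are excluded by Pre_check_f1, so the port leaves the report unchanged there
  (r.1, report1)

-- ===== PORT B =====
def pvMsg3 : String := "The string contains more than 1 chords separators \"|\" in brackets"

-- hand port of the split on the closing bracket (single-char separator): exact — Python cuts at
-- every closing bracket and keeps empty pieces; returned as (first piece, remaining pieces) so the
-- full result list is p.1 :: p.2
def pySplitRB : List Char → List Char × List (List Char)
  | [] => ([], [])
  | c :: cs =>
    let p := pySplitRB cs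
    if c = ']' then ([], p.1 :: p.2) else (c :: p.1, p.2)

-- the per-segment pipe count after the first opening bracket (Source B: seg.partition + count); exact
-- because the opening bracket kept by dropWhile is never counted as a pipe
def segSep (t : List Char) : Nat := (t.dropWhile (fun c => ¬ c = '[')).count '|'

-- pass 1 of B: bracket depth only
def bDepth : List Char → Int → Bool → Bool
  | [], _, bad => bad
  | c :: cs, d, bad =>
    let d' := if c = '[' then d + 1 else if c = ']' then d - 1 else d
    bDepth cs d' (bad || !(d' = 0 ∨ d' = 1))

def check_f1_alt (s : String) : Bool × List String :=
  let report := if PySem.Str.isIn "|]" s then [pvMsg1] else []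
  let report := if bDepth s.toList 0 false then report ++ [pvMsg2] else report
  let p := pySplitRB s.toList
  let report := if (p.1 :: p.2).any (fun t => 1 < segSep t) then report ++ [pvMsg3] else report
  (report.length == 0, report)

-- ===== PRECONDITION & SPEC =====
-- a separator overflow: an opening bracket at position k followed by two pipes at i < j, with no
-- closing bracket at any position in (k, j]
def pvBadPat (cs : List Char) : Prop :=
  ∃ k i j : Fin cs.length, k < i ∧ i < j ∧ cs.get k = '[' ∧ cs.get i = '|' ∧ cs.get j = '|' ∧
    ∀ m : Fin cs.length, k < m → m ≤ j → cs.get m ≠ ']'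
-- Pre_ excludes exactly the inputs on which A raises TypeError (the sep_mistake append applies the
-- bitwise-or operator to two strings): strings in which some opening bracket is followed by two
-- pipe characters with no closing bracket in between.
def Pre_check_f1 (s : String) : Prop := ¬ pvBadPat s.toList
instance (s : String) : Decidable (Pre_check_f1 s) := by unfold Pre_check_f1 pvBadPat; infer_instance

def pvWitness_check_f1 : String := "[a|-] [b]"

-- A raises TypeError in its final append exactly where some segment between closing brackets holds
-- more than one pipe after an opening bracket; B returns the string marked invalid with the
-- evidently intended separator message instead.
def Raises_check_f1 (s : String) : Prop := pvBadPat s.toList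
instance (s : String) : Decidable (Raises_check_f1 s) := by unfold Raises_check_f1 pvBadPat; infer_instance
def pvRaiseWitness_check_f1 : String := "[a|b|c]"
def pvRaiseWitnessOut_check_f1 : Bool × List String :=
  (false, ["The string contains more than 1 chords separators \"|\" in brackets"])

def Spec_check_f1 (s : String) (out : Bool × List String) : Prop := out = check_f1_alt s
instance (s : String) (out : Bool × List String) : Decidable (Spec_check_f1 s out) := by unfold Spec_check_f1; infer_instance

-- ===== CLAIM (what is proved, stated in full; the proofs are below) =====
def Claim_equal_check_f1 : Prop := ∀ (s : String), Dom_check_f1 s → Pre_check_f1 s → Spec_check_f1 s (check_f1 s)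
def Claim_raises_check_f1 : Prop :=
  (∀ (s : String), Dom_check_f1 s → Raises_check_f1 s → ¬ Pre_check_f1 s) ∧
  (Dom_check_f1 (pvRaiseWitness_check_f1) ∧ Raises_check_f1 (pvRaiseWitness_check_f1) ∧
    check_f1_alt (pvRaiseWitness_check_f1) = pvRaiseWitnessOut_check_f1)

-- ===== LEMMAS AND PROOFS =====

-- the three independent components of A's loop state
def badB : List Char → Int → Bool
  | [], _ => false
  | c :: cs, lvl =>
    let l := if c = '[' then lvl + 1 else if c = ']' then lvl - 1 else lvl
    (!(l = 0 ∨ l = 1)) || badB cs l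

def badS : List Char → Int → Bool → Bool
  | [], _, _ => false
  | c :: cs, sep, inb =>
    let sep' := if c = '[' then sep else if c = ']' then 0 else if c = '|' ∧ inb = true then sep + 1 else sep
    let inb' := if c = '[' then true else if c = ']' then false else inb
    (decide (sep' > 1)) || badS cs sep' inb'

def lvlF : List Char → Int → Int
  | [], lvl => lvl
  | c :: cs, lvl => lvlF cs (if c = '[' then lvl + 1 else if c = ']' then lvl - 1 else lvl)

def sepF : List Char → Int → Bool → Int × Bool
  | [], sep, inb => (sep, inb)
  | c :: cs, sep, inb =>
    sepF cs (if c = '[' then sep else if c = ']' then 0 else if c = '|' ∧ inb = true then sep + 1 else sep)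
            (if c = '[' then true else if c = ']' then false else inb)

theorem aLoop_eq (cs : List Char) (v bm sm : Bool) (lvl sep : Int) (inb : Bool) :
    aLoop cs (v, bm, sm, lvl, sep, inb) =
      (v && !badB cs lvl && !badS cs sep inb, bm || badB cs lvl, sm || badS cs sep inb,
       lvlF cs lvl, sepF cs sep inb) := by
  induction cs generalizing v bm sm lvl sep inb with
  | nil => simp [aLoop, badB, badS, lvlF, sepF]
  | cons c cs ih =>
    simp only [aLoop, badB, badS, lvlF, sepF]
    rw [ih]
    generalize (if c = '[' then lvl + 1 else if c = ']' then lvl - 1 else lvl) = l'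
    generalize (if c = '[' then sep else if c = ']' then 0 else if c = '|' ∧ inb = true then sep + 1 else sep) = s'
    by_cases h1 : (l' = 0 ∨ l' = 1) <;> by_cases h2 : s' > 1 <;> simp [h1, h2]

theorem bDepth_eq (cs : List Char) (d : Int) (bad : Bool) :
    bDepth cs d bad = (bad || badB cs d) := by
  induction cs generalizing d bad with
  | nil => simp [bDepth, badB]
  | cons c cs ih => simp only [bDepth, badB]; rw [ih]; split_ifs <;> simp [Bool.or_assoc]

lemma segSep_cons_of_ne (c : Char) (t : List Char) (hc : ¬ c = '[') :
    segSep (c :: t) = segSep t := by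
  simp [segSep, List.dropWhile, hc]

lemma segSep_cons_open (t : List Char) : segSep ('[' :: t) = t.count '|' := by
  simp [segSep, List.dropWhile]

-- the separator count the loop will reach at the end of the current segment
def carrySep (sep : Int) (inb : Bool) (t : List Char) : Int :=
  if inb then sep + (t.count '|' : Int) else (segSep t : Int)

-- if the sep counter ever exceeds 1, some ']'-delimited segment carries >= 2 counted separators
theorem badS_chunks (cs : List Char) (sep : Int) (inb : Bool) (h0 : inb = false → sep = 0)
    (hbad : badS cs sep inb = true) :
    2 ≤ carrySep sep inb (pySplitRB cs).1 ∨ ∃ t ∈ (pySplitRB cs).2, 2 ≤ segSep t := by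
  induction cs generalizing sep inb with
  | nil => simp [badS] at hbad
  | cons c cs ih =>
    simp only [badS] at hbad
    by_cases hc1 : c = '['
    · subst hc1
      have hsplit : pySplitRB ('[' :: cs) = ('[' :: (pySplitRB cs).1, (pySplitRB cs).2) := by
        simp [pySplitRB]
      rw [if_pos rfl] at hbad
      have hcarry : carrySep sep inb ('[' :: (pySplitRB cs).1) = carrySep sep true (pySplitRB cs).1 := by
        cases inb
        · rw [h0 rfl]
          simp [carrySep, segSep_cons_open]
        · simp [carrySep]
      rw [hsplit, hcarry]
      rcases Bool.or_eq_true_iff.mp hbad with hf | hrec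
      · left
        have hsep : 1 < sep := by simpa using hf
        have : (0 : Int) ≤ ((pySplitRB cs).1.count '|' : Int) := by positivity
        simp [carrySep]
        omega
      · exact ih sep true (by simp) hrec
    · by_cases hc2 : c = ']'
      · subst hc2
        rw [if_neg (by decide : ¬ (']' = '[')), if_pos rfl] at hbad
        have hrec : badS cs 0 false = true := by
          rcases Bool.or_eq_true_iff.mp hbad with hf | hrec
          · simp at hf
          · exact hrec
        right
        have hsplit : pySplitRB (']' :: cs) = ([], (pySplitRB cs).1 :: (pySplitRB cs).2) := by
          simp [pySplitRB]
        rw [hsplit]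
        rcases ih 0 false (fun _ => rfl) hrec with hhead | ⟨t, ht, h2⟩
        · exact ⟨(pySplitRB cs).1, by simp, by
            simp [carrySep] at hhead
            exact_mod_cast hhead⟩
        · exact ⟨t, by simp [ht], h2⟩
      · -- c is neither '[' nor ']'
        have hsplit : pySplitRB (c :: cs) = (c :: (pySplitRB cs).1, (pySplitRB cs).2) := by
          simp [pySplitRB, hc2]
        rw [hsplit]
        by_cases hcp : c = '|' ∧ inb = true
        · obtain ⟨hcp1, hcp2⟩ := hcp
          subst hcp1; subst hcp2
          rw [if_neg hc1, if_neg hc2, if_pos (show '|' = '|' ∧ (true : Bool) = true from ⟨rfl, rfl⟩)] at hbad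
          have hcarry : carrySep sep true ('|' :: (pySplitRB cs).1) = carrySep (sep + 1) true (pySplitRB cs).1 := by
            simp [carrySep]
            omega
          rw [hcarry]
          rcases Bool.or_eq_true_iff.mp hbad with hf | hrec
          · left
            have hsep : 1 < sep + 1 := by simp at hf; omega
            have : (0 : Int) ≤ ((pySplitRB cs).1.count '|' : Int) := by positivity
            simp [carrySep]
            omega
          · exact ih (sep + 1) true (by simp) hrec
        · simp only [if_neg hc1, if_neg hc2, if_neg hcp] at hbad
          rcases Bool.or_eq_true_iff.mp hbad with hf | hrec
          · left
            have hsep : 1 < sep := by simpa using hf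
            have hinb : inb = true := by
              cases inb
              · exact absurd (h0 rfl) (by omega)
              · rfl
            subst hinb
            have : (0 : Int) ≤ ((c :: (pySplitRB cs).1).count '|' : Int) := by positivity
            simp [carrySep]
            omega
          · rcases ih sep inb h0 hrec with hhead | htail
            · left
              cases inb
              · simp only [carrySep, Bool.false_eq_true, if_neg (fun h => h)] at hhead ⊢
                rw [segSep_cons_of_ne c _ hc1]
                exact hhead
              · have hcb : (c == '|') = false := by
                  cases hcc : c == '|'
                  · rfl
                  · exact absurd ⟨by simpa using hcc, rfl⟩ hcp
                simp [carrySep, List.count_cons, hcb] at hhead ⊢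
                omega
            · right; exact htail

lemma pySplitRB_fst_prefix (cs : List Char) : (pySplitRB cs).1 <+: cs := by
  induction cs with
  | nil => simp [pySplitRB]
  | cons c cs ih =>
    by_cases hc : c = ']'
    · simp [pySplitRB, hc]
    · simp only [pySplitRB, if_neg hc]
      exact List.cons_prefix_cons.mpr ⟨rfl, ih⟩

lemma pySplitRB_infix (cs : List Char) (t : List Char)
    (ht : t ∈ (pySplitRB cs).1 :: (pySplitRB cs).2) : t <:+: cs := by
  induction cs generalizing t with
  | nil =>
    simp [pySplitRB] at ht
    simp [ht]
  | cons c cs ih =>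
    by_cases hc : c = ']'
    · subst hc
      simp only [pySplitRB] at ht
      rcases List.mem_cons.mp ht with h | h
      · simp [h]
      · exact (ih t h).trans (List.suffix_cons ']' cs).isInfix
    · simp only [pySplitRB, if_neg hc] at ht
      rcases List.mem_cons.mp ht with h | h
      · subst h
        exact (List.cons_prefix_cons.mpr ⟨rfl, pySplitRB_fst_prefix cs⟩).isInfix
      · exact (ih t (List.mem_cons_of_mem _ h)).trans (List.suffix_cons c cs).isInfix

lemma pySplitRB_no_rb (cs : List Char) (t : List Char)
    (ht : t ∈ (pySplitRB cs).1 :: (pySplitRB cs).2) : ']' ∉ t := by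
  induction cs generalizing t with
  | nil =>
    simp [pySplitRB] at ht
    simp [ht]
  | cons c cs ih =>
    by_cases hc : c = ']'
    · subst hc
      simp only [pySplitRB] at ht
      rcases List.mem_cons.mp ht with h | h
      · simp [h]
      · exact ih t h
    · simp only [pySplitRB, if_neg hc] at ht
      rcases List.mem_cons.mp ht with h | h
      · subst h
        intro hm
        rcases List.mem_cons.mp hm with h' | h'
        · exact hc h'.symm
        · exact ih (pySplitRB cs).1 (List.mem_cons_self) h'
      · exact ih t (List.mem_cons_of_mem _ h)

lemma pvTwoPos (l : List Char) (a : Char) (h : 2 ≤ l.count a) :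
    ∃ i j : Fin l.length, i < j ∧ l.get i = a ∧ l.get j = a := by
  induction l with
  | nil => simp at h
  | cons c l ih =>
    by_cases hc : c = a
    · subst hc
      have h1 : 1 ≤ l.count c := by
        have hcc : List.count c (c :: l) = List.count c l + 1 := List.count_cons_self
        omega
      have hm : c ∈ l := List.count_pos_iff.mp (by omega)
      obtain ⟨j, hj⟩ := List.mem_iff_get.mp hm
      exact ⟨⟨0, Nat.succ_pos _⟩, ⟨j.1 + 1, Nat.succ_lt_succ j.2⟩,
        Fin.mk_lt_mk.mpr (by omega), rfl, hj⟩
    · have h' : 2 ≤ l.count a := by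
        rw [List.count_cons] at h
        simp [hc] at h
        omega
      obtain ⟨i, j, hij, hi, hj⟩ := ih h'
      exact ⟨⟨i.1 + 1, Nat.succ_lt_succ i.2⟩, ⟨j.1 + 1, Nat.succ_lt_succ j.2⟩,
        Fin.mk_lt_mk.mpr (by have := Fin.lt_def.mp hij; omega), hi, hj⟩

lemma seg_pattern (t : List Char) (h : 2 ≤ segSep t) :
    ∃ k i j : Fin t.length, k < i ∧ i < j ∧ t.get k = '[' ∧ t.get i = '|' ∧ t.get j = '|' := by
  induction t with
  | nil => simp [segSep] at h
  | cons c t ih =>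
    by_cases hc : c = '['
    · subst hc
      rw [segSep_cons_open] at h
      obtain ⟨i, j, hij, hi, hj⟩ := pvTwoPos t '|' h
      exact ⟨⟨0, Nat.succ_pos _⟩, ⟨i.1 + 1, Nat.succ_lt_succ i.2⟩, ⟨j.1 + 1, Nat.succ_lt_succ j.2⟩,
        Fin.mk_lt_mk.mpr (by omega),
        Fin.mk_lt_mk.mpr (by have := Fin.lt_def.mp hij; omega), rfl, hi, hj⟩
    · rw [segSep_cons_of_ne c t hc] at h
      obtain ⟨k, i, j, hki, hij, hk, hi, hj⟩ := ih h
      exact ⟨⟨k.1 + 1, Nat.succ_lt_succ k.2⟩, ⟨i.1 + 1, Nat.succ_lt_succ i.2⟩,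
        ⟨j.1 + 1, Nat.succ_lt_succ j.2⟩,
        Fin.mk_lt_mk.mpr (by have := Fin.lt_def.mp hki; omega),
        Fin.mk_lt_mk.mpr (by have := Fin.lt_def.mp hij; omega), hk, hi, hj⟩

lemma get_mid (u t v : List Char) (n : Nat) (hn : n < t.length) :
    (u ++ t ++ v).get ⟨u.length + n, by simp; omega⟩ = t.get ⟨n, hn⟩ := by
  simp only [List.get_eq_getElem, List.append_assoc]
  rw [List.getElem_append_right (by omega : u.length ≤ u.length + n)]
  rw [List.getElem_append_left (by omega : u.length + n - u.length < t.length)]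
  congr 1
  omega

lemma embed (cs t : List Char) (hinf : t <:+: cs) (hno : ']' ∉ t)
    (hp : ∃ k i j : Fin t.length, k < i ∧ i < j ∧ t.get k = '[' ∧ t.get i = '|' ∧ t.get j = '|') :
    pvBadPat cs := by
  obtain ⟨u, v, huv⟩ := hinf
  subst huv
  obtain ⟨k, i, j, hki, hij, hk, hi, hj⟩ := hp
  have hlen : (u ++ t ++ v).length = u.length + t.length + v.length := by
    rw [List.length_append, List.length_append]
  refine ⟨⟨u.length + k.1, by rw [hlen]; have := k.2; omega⟩,
    ⟨u.length + i.1, by rw [hlen]; have := i.2; omega⟩,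
    ⟨u.length + j.1, by rw [hlen]; have := j.2; omega⟩, ?_, ?_, ?_, ?_, ?_, ?_⟩
  · have := Fin.lt_def.mp hki; simp only [Fin.lt_def]; omega
  · have := Fin.lt_def.mp hij; simp only [Fin.lt_def]; omega
  · rw [get_mid u t v k.1 k.2]; exact hk
  · rw [get_mid u t v i.1 i.2]; exact hi
  · rw [get_mid u t v j.1 j.2]; exact hj
  · intro m hm1 hm2
    simp only [Fin.lt_def, Fin.le_def] at hm1 hm2
    have hj2 := j.2
    have hmlt : m.1 - u.length < t.length := by omega
    have hm3 : (u ++ t ++ v).get m = t.get ⟨m.1 - u.length, hmlt⟩ := by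
      simp only [List.get_eq_getElem, List.append_assoc]
      rw [List.getElem_append_right (by omega : u.length ≤ m.1)]
      rw [List.getElem_append_left hmlt]
    rw [hm3]
    intro hrb
    exact hno (hrb ▸ List.get_mem t _)

-- a bad chunk of the split yields the separator-overflow pattern of Pre_ inside the string
lemma chunk_bad_to_badpat (cs : List Char)
    (h : ∃ t ∈ (pySplitRB cs).1 :: (pySplitRB cs).2, 2 ≤ segSep t) : pvBadPat cs := by
  obtain ⟨t, ht, h2⟩ := h
  exact embed cs t (pySplitRB_infix cs t ht) (pySplitRB_no_rb cs t ht) (seg_pattern t h2)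

theorem check_f1_spec : Claim_equal_check_f1 := by
  intro s _ hpre
  unfold Spec_check_f1 check_f1 check_f1_alt
  have hgood : ∀ t ∈ (pySplitRB s.toList).1 :: (pySplitRB s.toList).2, segSep t ≤ 1 := by
    intro t ht
    by_contra hnot
    exact hpre (chunk_bad_to_badpat s.toList ⟨t, ht, by omega⟩)
  have hS : badS s.toList 0 false = false := by
    by_contra h
    have h' : badS s.toList 0 false = true := by simpa using h
    rcases badS_chunks s.toList 0 false (fun _ => rfl) h' with hhead | ⟨t, ht, h2⟩
    · simp [carrySep] at hhead
      have := hgood (pySplitRB s.toList).1 (by simp)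
      omega
    · have := hgood t (by simp [ht]); omega
  have hAny : (((pySplitRB s.toList).1 :: (pySplitRB s.toList).2).any (fun t => decide (1 < segSep t))) = false := by
    simp only [List.any_eq_false, decide_eq_true_eq]
    intro t ht
    have := hgood t ht
    omega
  simp only [aLoop_eq, bDepth_eq, hAny, hS, Bool.not_false, Bool.and_true, Bool.false_or,
    Bool.or_false, Bool.false_eq_true, if_neg (fun h => h)]
  cases hIn : PySem.Str.isIn "|]" s <;> cases hB : badB s.toList 0 <;> simp [pvMsg1, pvMsg2]

def check_f1_raises : Claim_raises_check_f1 := by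
  unfold Claim_raises_check_f1
  constructor
  · intro s _ hb hpre
    exact hpre hb
  · exact ⟨by decide, by decide, by decide⟩
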